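-- pv_equiv track=rewrite | github.com/Primus2026/primus-backend | app/services/chess_service.py | _cells_on_path
-- ===== SOURCE A (Python) =====
-- from typing import List, Dict, Optional, Tuple
--
-- def _cells_on_path(col1: int, row1: int, col2: int, row2: int) -> List[Tuple[int, int]]:
--     """Zwraca listę pól przecinanych przez odcinek (bez pola początkowego i końcowego) (Bresenham)."""
--     def sign(i):
--         return 1 if i > 0 else -1 if i < 0 else 0
--
--     dx, dy = abs(col2 - col1), abs(row2 - row1)
--     sx, sy = sign(col2 - col1), sign(row2 - row1)
--     err = dx - dy
--     x, y = col1, row1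
--     cells = []
--     while (x, y) != (col2, row2):
--         cells.append((x, y))
--         e2 = 2 * err
--         if e2 > -dy:
--             err -= dy
--             x += sx
--         if e2 < dx:
--             err += dx
--             y += sy
--     # Usuwamy punkt początkowy
--     if cells and cells[0] == (col1, row1):
--         cells.pop(0)
--     return cells
-- ===== SOURCE B (Python) =====
-- def _cells_on_path(col1, row1, col2, row2):
--     """Major-axis Bresenham with a single decision variable; intermediate cells only."""
--     dx = abs(col2 - col1)
--     dy = abs(row2 - row1)
--     sx = (col2 > col1) - (col2 < col1)
--     sy = (row2 > row1) - (row2 < row1)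
--     cells = []
--     x, y = col1, row1
--     if dx >= dy:
--         e = 2 * dy - dx
--         for _ in range(dx - 1):
--             x += sx
--             if e > 0:
--                 y += sy
--                 e -= 2 * dx
--             e += 2 * dy
--             cells.append((x, y))
--     else:
--         e = 2 * dx - dy
--         for _ in range(dy - 1):
--             y += sy
--             if e > 0:
--                 x += sx
--                 e -= 2 * dy
--             e += 2 * dx
--             cells.append((x, y))
--     return cells
-- ===== Notes on version B (the rewrite author's own statement) =====
-- stated objective: alternative
-- what changed: Replaced the symmetric dual-error Bresenham while-loop (which appends the start cell and pops it afterwards) by a major-axis driven variant: the longer axis advances unconditionally for exactly max(dx,dy)-1 counted steps, a single decision variable steps the minor axis, and cells are emitted after stepping so start and end are never produced.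
import Mathlib
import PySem

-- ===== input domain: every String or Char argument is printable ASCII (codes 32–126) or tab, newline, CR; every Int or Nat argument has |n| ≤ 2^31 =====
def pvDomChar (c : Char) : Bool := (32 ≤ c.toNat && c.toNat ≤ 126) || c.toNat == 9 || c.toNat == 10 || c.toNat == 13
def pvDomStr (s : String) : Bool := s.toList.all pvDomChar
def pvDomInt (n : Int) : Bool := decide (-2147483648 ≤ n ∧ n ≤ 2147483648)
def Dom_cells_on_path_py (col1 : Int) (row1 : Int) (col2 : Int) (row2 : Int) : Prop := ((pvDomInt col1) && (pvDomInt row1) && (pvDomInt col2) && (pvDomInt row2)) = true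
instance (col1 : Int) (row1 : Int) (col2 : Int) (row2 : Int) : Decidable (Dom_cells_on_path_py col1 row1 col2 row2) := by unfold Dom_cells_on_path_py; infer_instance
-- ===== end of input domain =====

-- B replaces A's dual-error Bresenham while-loop (append start cell, pop it afterwards) by a
-- major-axis driven single-decision-variable Bresenham emitting intermediate cells only
-- (objective: alternative, same cost).

-- ===== PORT A =====
-- Python's nested `sign`
def pySign (i : Int) : Int := if i > 0 then 1 else if i < 0 then -1 else 0

-- the `while (x, y) != (col2, row2)` loop, fuel-based (the fuel dx+dy+1 always suffices,
-- proved below); `e2 = 2 * err` is written out, the two sequential err updates are one sum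
def aLoop (col2 row2 dx dy sx sy : Int) : Nat → Int → Int → Int → List (Int × Int) → List (Int × Int)
  | 0, _, _, _, cells => cells
  | fuel+1, x, y, err, cells =>
    if (x, y) ≠ (col2, row2) then
      aLoop col2 row2 dx dy sx sy fuel
        (if 2*err > -dy then x + sx else x)
        (if 2*err < dx then y + sy else y)
        ((if 2*err > -dy then err - dy else err) + (if 2*err < dx then dx else 0))
        (cells ++ [(x, y)])
    else cells

-- `if cells and cells[0] == (col1, row1): cells.pop(0)`
def aPop (col1 row1 : Int) (cells : List (Int × Int)) : List (Int × Int) :=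
  if cells ≠ [] ∧ cells.head? = some (col1, row1) then cells.drop 1 else cells

def cells_on_path_py (col1 : Int) (row1 : Int) (col2 : Int) (row2 : Int) : List (Int × Int) :=
  aPop col1 row1
    (aLoop col2 row2 |col2 - col1| |row2 - row1| (pySign (col2 - col1)) (pySign (row2 - row1))
      (|col2 - col1| + |row2 - row1| + 1).toNat col1 row1 (|col2 - col1| - |row2 - row1|) [])

-- ===== PORT B =====
-- `for _ in range(dx - 1)` loop of Source B: x is the driving axis
def bLoopX (dx dy sx sy : Int) : Nat → Int → Int → Int → List (Int × Int) → List (Int × Int)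
  | 0, _, _, _, cells => cells
  | n+1, x, y, e, cells =>
    bLoopX dx dy sx sy n
      (x + sx)
      (if e > 0 then y + sy else y)
      ((if e > 0 then e - 2*dx else e) + 2*dy)
      (cells ++ [(x + sx, if e > 0 then y + sy else y)])

-- `for _ in range(dy - 1)` loop of Source B: y is the driving axis
def bLoopY (dx dy sx sy : Int) : Nat → Int → Int → Int → List (Int × Int) → List (Int × Int)
  | 0, _, _, _, cells => cells
  | n+1, x, y, e, cells =>
    bLoopY dx dy sx sy n
      (if e > 0 then x + sx else x)
      (y + sy)
      ((if e > 0 then e - 2*dy else e) + 2*dx)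
      (cells ++ [((if e > 0 then x + sx else x), y + sy)])

def cells_on_path_py_alt (col1 : Int) (row1 : Int) (col2 : Int) (row2 : Int) : List (Int × Int) :=
  -- sx = (col2 > col1) - (col2 < col1), sy likewise (Python bool arithmetic, ported as if-chains)
  if |col2 - col1| ≥ |row2 - row1| then
    bLoopX (|col2 - col1|) (|row2 - row1|)
      ((if col1 < col2 then 1 else 0) - (if col2 < col1 then 1 else 0))
      ((if row1 < row2 then 1 else 0) - (if row2 < row1 then 1 else 0))
      (|col2 - col1| - 1).toNat col1 row1 (2 * |row2 - row1| - |col2 - col1|) []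
  else
    bLoopY (|col2 - col1|) (|row2 - row1|)
      ((if col1 < col2 then 1 else 0) - (if col2 < col1 then 1 else 0))
      ((if row1 < row2 then 1 else 0) - (if row2 < row1 then 1 else 0))
      (|row2 - row1| - 1).toNat col1 row1 (2 * |col2 - col1| - |row2 - row1|) []

-- ===== PRECONDITION & SPEC =====
def Spec_cells_on_path_py (col1 : Int) (row1 : Int) (col2 : Int) (row2 : Int) (out : List (Int × Int)) : Prop := out = cells_on_path_py_alt col1 row1 col2 row2
instance (col1 : Int) (row1 : Int) (col2 : Int) (row2 : Int) (out : List (Int × Int)) : Decidable (Spec_cells_on_path_py col1 row1 col2 row2 out) := by unfold Spec_cells_on_path_py; infer_instance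

-- ===== CLAIM (what is proved, stated in full; the proofs are below) =====
def Claim_equal_cells_on_path_py : Prop := ∀ (col1 : Int) (row1 : Int) (col2 : Int) (row2 : Int), Dom_cells_on_path_py col1 row1 col2 row2 → Spec_cells_on_path_py col1 row1 col2 row2 (cells_on_path_py col1 row1 col2 row2)

-- ===== LEMMAS AND PROOFS =====

lemma abs_mul_pySign (i : Int) : |i| * pySign i = i := by
  unfold pySign
  split_ifs with h1 h2
  · simp [abs_of_pos h1]
  · rw [abs_of_neg h2]; ring
  · have hi : i = 0 := by omega
    simp [hi]

lemma pySign_eq_boolsub (i j : Int) :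
    pySign (j - i) = (if i < j then 1 else 0) - (if j < i then 1 else 0) := by
  unfold pySign; split_ifs <;> omega

lemma bLoopX_acc (dx dy sx sy : Int) :
    ∀ (n : Nat) (x y e : Int) (c d : List (Int × Int)),
      bLoopX dx dy sx sy n x y e (c ++ d) = c ++ bLoopX dx dy sx sy n x y e d := by
  intro n
  induction n with
  | zero => intro x y e c d; simp [bLoopX]
  | succ k ih => intro x y e c d; rw [bLoopX, bLoopX, List.append_assoc, ih]

lemma bLoopY_acc (dx dy sx sy : Int) :
    ∀ (n : Nat) (x y e : Int) (c d : List (Int × Int)),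
      bLoopY dx dy sx sy n x y e (c ++ d) = c ++ bLoopY dx dy sx sy n x y e d := by
  intro n
  induction n with
  | zero => intro x y e c d; simp [bLoopY]
  | succ k ih => intro x y e c d; rw [bLoopY, bLoopY, List.append_assoc, ih]

-- bisimulation, x is the major axis (0 ≤ dy ≤ dx, 1 ≤ dx);
-- m = remaining x-steps, r = remaining y-steps
lemma bisX (col2 row2 dx dy sx sy : Int) (hdx : 1 ≤ dx) (hdy : 0 ≤ dy) (hle : dy ≤ dx)
    (hsx : sx = 1 ∨ sx = -1) :
    ∀ (m : Nat), 1 ≤ m → ∀ (fuel : Nat) (r x y err : Int) (cells : List (Int × Int)),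
      0 ≤ r →
      x = col2 - (m : Int) * sx →
      y = row2 - r * sy →
      err = dx - dy + (m : Int) * dy - r * dx →
      2 * (m : Int) * dy ≤ 2 * r * dx + dx - 1 →
      2 * r * dx < 2 * (m : Int) * dy + 2 * dx - dy →
      m ≤ fuel →
      aLoop col2 row2 dx dy sx sy fuel x y err cells
        = bLoopX dx dy sx sy (m - 1) x y (dx - 2 * err) (cells ++ [(x, y)]) := by
  intro m
  induction m with
  | zero => omega
  | succ n ih =>
    intro _ fuel r x y err cells hr hx hy herr hL hU hfuel
    obtain ⟨f, rfl⟩ : ∃ f, fuel = f + 1 := ⟨fuel - 1, by omega⟩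
    have hxne : x ≠ col2 := by
      rcases hsx with h | h <;> subst h <;>
        simp only [mul_one, mul_neg_one] at hx <;> omega
    have hne : ((x, y) : Int × Int) ≠ (col2, row2) := fun h => hxne (congrArg Prod.fst h)
    rw [aLoop, if_pos hne]
    have herr2 : 2 * err = 2*dx - 2*dy + 2*((n+1 : Nat) : Int)*dy - 2*(r*dx) := by
      rw [herr]; push_cast; ring
    push_cast at herr2 hx hL hU
    have hxadv : 2 * err > -dy := by rw [herr2]; nlinarith
    rw [if_pos hxadv, if_pos hxadv]
    have hx1 : x + sx = col2 - (n : Int) * sx := by rw [hx]; ring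
    simp only [Nat.add_sub_cancel]
    by_cases hyadv : 2 * err < dx
    · rw [if_pos hyadv, if_pos hyadv]
      have hyadv' := hyadv
      rw [herr2] at hyadv'
      have hr1 : 1 ≤ r := by nlinarith
      have hy1 : y + sy = row2 - (r - 1) * sy := by rw [hy]; ring
      have herr' : err - dy + dx = dx - dy + (n : Int) * dy - (r - 1) * dx := by
        rw [herr]; push_cast; ring
      have hL' : 2 * (n : Int) * dy ≤ 2 * (r - 1) * dx + dx - 1 := by nlinarith
      have hU' : 2 * (r - 1) * dx < 2 * (n : Int) * dy + 2 * dx - dy := by nlinarith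
      rcases Nat.eq_zero_or_pos n with hn0 | hn1
      · subst hn0
        norm_num at hL' hU'
        have hrr : r = 1 := by
          have : r ≤ 1 := by by_contra hc; push_neg at hc; nlinarith [mul_nonneg (show (0:Int) ≤ r - 2 by omega) (show (0:Int) ≤ dx by omega)]
          omega
        have hx2 : x + sx = col2 := by rw [hx1]; simp
        have hy2 : y + sy = row2 := by rw [hy1, hrr]; norm_num
        rw [hx2, hy2, bLoopX]
        cases f with
        | zero => rw [aLoop]
        | succ k => rw [aLoop, if_neg (by simp)]
      · obtain ⟨k, rfl⟩ : ∃ k, n = k + 1 := ⟨n - 1, by omega⟩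
        rw [ih (by omega) f (r - 1) (x + sx) (y + sy) (err - dy + dx) (cells ++ [(x, y)])
            (by omega) hx1 hy1 herr' hL' hU' (by omega)]
        have hegt : dx - 2*err > 0 := by omega
        conv_rhs => rw [bLoopX]
        rw [if_pos hegt, if_pos hegt]
        simp only [Nat.add_sub_cancel]
        congr 1
        ring
    · rw [if_neg hyadv, if_neg hyadv]
      have hnyadv : dx ≤ 2 * err := by omega
      rw [herr2] at hnyadv
      have hL' : 2 * (n : Int) * dy ≤ 2 * r * dx + dx - 1 := by nlinarith
      have hU' : 2 * r * dx < 2 * (n : Int) * dy + 2 * dx - dy := by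
        rcases lt_or_eq_of_le hle with hlt | heq
        · nlinarith
        · exfalso; rw [heq] at hnyadv hL; nlinarith
      have herr' : err - dy + 0 = dx - dy + (n : Int) * dy - r * dx := by
        rw [herr]; push_cast; ring
      rcases Nat.eq_zero_or_pos n with hn0 | hn1
      · subst hn0
        norm_num at hL' hU'
        have hrr : r = 0 := by
          have : r ≤ 0 := by by_contra hc; push_neg at hc; nlinarith [mul_nonneg (show (0:Int) ≤ r - 1 by omega) (show (0:Int) ≤ dx by omega)]
          omega
        have hx2 : x + sx = col2 := by rw [hx1]; simp
        have hy2 : y = row2 := by rw [hy, hrr]; ring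
        rw [hx2, hy2, bLoopX]
        cases f with
        | zero => rw [aLoop]
        | succ k => rw [aLoop, if_neg (by simp)]
      · obtain ⟨k, rfl⟩ : ∃ k, n = k + 1 := ⟨n - 1, by omega⟩
        rw [ih (by omega) f r (x + sx) y (err - dy + 0) (cells ++ [(x, y)])
            hr hx1 hy herr' hL' hU' (by omega)]
        have hegt : ¬ (dx - 2*err > 0) := by omega
        conv_rhs => rw [bLoopX]
        rw [if_neg hegt, if_neg hegt]
        simp only [Nat.add_sub_cancel]
        congr 1
        ring

-- bisimulation, y is the major axis (0 ≤ dx < dy);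
-- m = remaining y-steps, r = remaining x-steps
lemma bisY (col2 row2 dx dy sx sy : Int) (hdy : 1 ≤ dy) (hdx : 0 ≤ dx) (hlt : dx < dy)
    (hsy : sy = 1 ∨ sy = -1) :
    ∀ (m : Nat), 1 ≤ m → ∀ (fuel : Nat) (r x y err : Int) (cells : List (Int × Int)),
      0 ≤ r →
      x = col2 - r * sx →
      y = row2 - (m : Int) * sy →
      err = dx - dy - (m : Int) * dx + r * dy →
      2 * (m : Int) * dx ≤ 2 * r * dy + dy - 1 →
      2 * r * dy < 2 * (m : Int) * dx + 2 * dy - dx →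
      m ≤ fuel →
      aLoop col2 row2 dx dy sx sy fuel x y err cells
        = bLoopY dx dy sx sy (m - 1) x y (2 * err + dy) (cells ++ [(x, y)]) := by
  intro m
  induction m with
  | zero => omega
  | succ n ih =>
    intro _ fuel r x y err cells hr hx hy herr hL hU hfuel
    obtain ⟨f, rfl⟩ : ∃ f, fuel = f + 1 := ⟨fuel - 1, by omega⟩
    have hyne : y ≠ row2 := by
      rcases hsy with h | h <;> subst h <;>
        simp only [mul_one, mul_neg_one] at hy <;> omega
    have hne : ((x, y) : Int × Int) ≠ (col2, row2) := fun h => hyne (congrArg Prod.snd h)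
    rw [aLoop, if_pos hne]
    have herr2 : 2 * err = 2*dx - 2*dy - 2*((n+1 : Nat) : Int)*dx + 2*(r*dy) := by
      rw [herr]; push_cast; ring
    push_cast at herr2 hy hL hU
    have hyadv : 2 * err < dx := by rw [herr2]; nlinarith
    rw [if_pos hyadv, if_pos hyadv]
    have hy1 : y + sy = row2 - (n : Int) * sy := by rw [hy]; ring
    simp only [Nat.add_sub_cancel]
    by_cases hxadv : 2 * err > -dy
    · rw [if_pos hxadv, if_pos hxadv]
      have hxadv' := hxadv
      rw [herr2] at hxadv'
      have hr1 : 1 ≤ r := by nlinarith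
      have hx1 : x + sx = col2 - (r - 1) * sx := by rw [hx]; ring
      have herr' : err - dy + dx = dx - dy - (n : Int) * dx + (r - 1) * dy := by
        rw [herr]; push_cast; ring
      have hL' : 2 * (n : Int) * dx ≤ 2 * (r - 1) * dy + dy - 1 := by nlinarith
      have hU' : 2 * (r - 1) * dy < 2 * (n : Int) * dx + 2 * dy - dx := by nlinarith
      rcases Nat.eq_zero_or_pos n with hn0 | hn1
      · subst hn0
        norm_num at hL' hU'
        have hrr : r = 1 := by
          have : r ≤ 1 := by by_contra hc; push_neg at hc; nlinarith [mul_nonneg (show (0:Int) ≤ r - 2 by omega) (show (0:Int) ≤ dy by omega)]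
          omega
        have hy2 : y + sy = row2 := by rw [hy1]; simp
        have hx2 : x + sx = col2 := by rw [hx1, hrr]; norm_num
        rw [hx2, hy2, bLoopY]
        cases f with
        | zero => rw [aLoop]
        | succ k => rw [aLoop, if_neg (by simp)]
      · obtain ⟨k, rfl⟩ : ∃ k, n = k + 1 := ⟨n - 1, by omega⟩
        rw [ih (by omega) f (r - 1) (x + sx) (y + sy) (err - dy + dx) (cells ++ [(x, y)])
            (by omega) hx1 hy1 herr' hL' hU' (by omega)]
        have hegt : 2*err + dy > 0 := by omega
        conv_rhs => rw [bLoopY]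
        rw [if_pos hegt, if_pos hegt]
        simp only [Nat.add_sub_cancel]
        congr 1
        ring
    · rw [if_neg hxadv, if_neg hxadv]
      have hnxadv : 2 * err ≤ -dy := by omega
      rw [herr2] at hnxadv
      have hL' : 2 * (n : Int) * dx ≤ 2 * r * dy + dy - 1 := by nlinarith
      have hU' : 2 * r * dy < 2 * (n : Int) * dx + 2 * dy - dx := by nlinarith
      have herr' : err + dx = dx - dy - (n : Int) * dx + r * dy := by
        rw [herr]; push_cast; ring
      rcases Nat.eq_zero_or_pos n with hn0 | hn1
      · subst hn0
        norm_num at hL' hU'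
        have hrr : r = 0 := by
          have : r ≤ 0 := by by_contra hc; push_neg at hc; nlinarith [mul_nonneg (show (0:Int) ≤ r - 1 by omega) (show (0:Int) ≤ dy by omega)]
          omega
        have hy2 : y + sy = row2 := by rw [hy1]; simp
        have hx2 : x = col2 := by rw [hx, hrr]; ring
        rw [hx2, hy2, bLoopY]
        cases f with
        | zero => rw [aLoop]
        | succ k => rw [aLoop, if_neg (by simp)]
      · obtain ⟨k, rfl⟩ : ∃ k, n = k + 1 := ⟨n - 1, by omega⟩
        rw [ih (by omega) f r x (y + sy) (err + dx) (cells ++ [(x, y)])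
            hr hx hy1 herr' hL' hU' (by omega)]
        have hegt : ¬ (2*err + dy > 0) := by omega
        conv_rhs => rw [bLoopY]
        rw [if_neg hegt, if_neg hegt]
        simp only [Nat.add_sub_cancel]
        congr 1
        ring

-- ===== VERDICT (by name: the statement is the Claim_ definition above) =====
theorem cells_on_path_py_spec : Claim_equal_cells_on_path_py := by
  intro col1 row1 col2 row2 _
  unfold Spec_cells_on_path_py cells_on_path_py cells_on_path_py_alt
  have hax : (0:Int) ≤ |col2 - col1| := abs_nonneg _
  have hay : (0:Int) ≤ |row2 - row1| := abs_nonneg _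
  rw [← pySign_eq_boolsub col1 col2, ← pySign_eq_boolsub row1 row2]
  by_cases hge : |row2 - row1| ≤ |col2 - col1|
  · rw [if_pos hge]
    by_cases hz : |col2 - col1| = 0
    · have hz2 : |row2 - row1| = 0 := by omega
      have hc : col2 = col1 := by
        have := abs_eq_zero.mp hz; omega
      have hrr : row2 = row1 := by
        have := abs_eq_zero.mp hz2; omega
      rw [hz, hz2, hc, hrr]
      norm_num [aLoop, aPop, bLoopX]
      rfl
    · have h1 : (1:Int) ≤ |col2 - col1| := by omega
      have hc0 : col2 - col1 ≠ 0 := fun h => by rw [h] at h1; simp at h1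
      have hsx : pySign (col2 - col1) = 1 ∨ pySign (col2 - col1) = -1 := by
        unfold pySign; split_ifs with p q
        · left; rfl
        · right; rfl
        · exact absurd (by omega) hc0
      have hcast : (((|col2 - col1|).toNat : Int)) = |col2 - col1| := Int.toNat_of_nonneg hax
      have key := bisX col2 row2 |col2 - col1| |row2 - row1| (pySign (col2 - col1))
          (pySign (row2 - row1)) h1 hay hge hsx
          (|col2 - col1|).toNat (by omega)
          (|col2 - col1| + |row2 - row1| + 1).toNat
          (|row2 - row1|) col1 row1 (|col2 - col1| - |row2 - row1|) []
          hay
          (by rw [hcast, abs_mul_pySign]; ring)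
          (by rw [abs_mul_pySign]; ring)
          (by rw [hcast]; ring)
          (by rw [hcast]; nlinarith)
          (by rw [hcast]; nlinarith)
          (by omega)
      rw [key, List.nil_append,
        show |col2 - col1| - 2 * (|col2 - col1| - |row2 - row1|)
            = 2 * |row2 - row1| - |col2 - col1| by ring,
        show (|col2 - col1|).toNat - 1 = (|col2 - col1| - 1).toNat by omega,
        show [((col1:Int), (row1:Int))] = [((col1:Int), (row1:Int))] ++ [] from (List.append_nil _).symm,
        bLoopX_acc]
      unfold aPop
      rw [if_pos (by simp)]
      simp
  · rw [if_neg hge]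
    push_neg at hge
    have h1 : (1:Int) ≤ |row2 - row1| := by omega
    have hr0 : row2 - row1 ≠ 0 := fun h => by rw [h] at h1; simp at h1
    have hsy : pySign (row2 - row1) = 1 ∨ pySign (row2 - row1) = -1 := by
      unfold pySign; split_ifs with p q
      · left; rfl
      · right; rfl
      · exact absurd (by omega) hr0
    have hcast : (((|row2 - row1|).toNat : Int)) = |row2 - row1| := Int.toNat_of_nonneg hay
    have key := bisY col2 row2 |col2 - col1| |row2 - row1| (pySign (col2 - col1))
        (pySign (row2 - row1)) h1 hax hge hsy
        (|row2 - row1|).toNat (by omega)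
        (|col2 - col1| + |row2 - row1| + 1).toNat
        (|col2 - col1|) col1 row1 (|col2 - col1| - |row2 - row1|) []
        hax
        (by rw [abs_mul_pySign]; ring)
        (by rw [hcast, abs_mul_pySign]; ring)
        (by rw [hcast]; ring)
        (by rw [hcast]; nlinarith)
        (by rw [hcast]; nlinarith)
        (by omega)
    rw [key, List.nil_append,
      show 2 * (|col2 - col1| - |row2 - row1|) + |row2 - row1|
          = 2 * |col2 - col1| - |row2 - row1| by ring,
      show (|row2 - row1|).toNat - 1 = (|row2 - row1| - 1).toNat by omega,
      show [((col1:Int), (row1:Int))] = [((col1:Int), (row1:Int))] ++ [] from (List.append_nil _).symm,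
      bLoopY_acc]
    unfold aPop
    rw [if_pos (by simp)]
    simp
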